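-- pv_equiv track=rewrite | github.com/FeebleOldMan/references | hackerrank/algorithms/search/hackerland_radio_transmitters.py | min_transmitters
-- ===== SOURCE A (Python) =====
-- def min_transmitters(num_houses, transmit_range, houses):
--     count = 1
--     houses = sorted(set(houses))
--     base_house, candidate_house = houses[0], houses[0]
--     for house in houses[1:]:
--         if house <= base_house + transmit_range:
--             candidate_house = house
--         elif house > candidate_house + transmit_range:
--             count += 1
--             base_house = house
--     return count
-- ===== SOURCE B (Python) =====
-- def min_transmitters(num_houses, transmit_range, houses):
--     hs = sorted(set(houses))
--     n = len(hs)
--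
--     def bisect_right(x):
--         # index of the first house > x (hand-written: no imports in the original module)
--         lo, hi = 0, n
--         while lo < hi:
--             mid = (lo + hi) // 2
--             if hs[mid] <= x:
--                 lo = mid + 1
--             else:
--                 hi = mid
--         return lo
--
--     count = 0
--     i = 0
--     while i < n:
--         count += 1
--         j = bisect_right(hs[i] + transmit_range)
--         center = hs[j - 1]
--         i = bisect_right(center + transmit_range)
--     return count
-- ===== Notes on version B (the rewrite author's own statement) =====
-- stated objective: alternative
-- what changed: Replaces A's single flat fold carrying (count, base, candidate) state over all houses with a sorted-array binary-search greedy: per transmitter, one hand-written bisect_right jump finds the transmitter house and a second jump skips every covered house, so no element-by-element state updates remain.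
-- outside the precondition, e.g. on min_transmitters(3, -1, [1, 2, 3]): A returns 3, B does not finish within the time limit
import Mathlib
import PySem

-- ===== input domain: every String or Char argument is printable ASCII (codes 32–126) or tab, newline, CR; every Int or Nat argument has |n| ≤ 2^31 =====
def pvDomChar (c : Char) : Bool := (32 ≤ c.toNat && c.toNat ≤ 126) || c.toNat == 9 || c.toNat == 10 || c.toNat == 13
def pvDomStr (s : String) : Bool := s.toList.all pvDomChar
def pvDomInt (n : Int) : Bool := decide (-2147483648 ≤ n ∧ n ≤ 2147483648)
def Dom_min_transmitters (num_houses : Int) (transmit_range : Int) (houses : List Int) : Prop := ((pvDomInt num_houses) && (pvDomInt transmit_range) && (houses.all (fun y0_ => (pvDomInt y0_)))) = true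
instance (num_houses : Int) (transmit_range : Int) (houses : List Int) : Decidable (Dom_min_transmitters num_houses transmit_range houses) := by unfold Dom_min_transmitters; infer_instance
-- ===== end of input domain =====

-- B replaces A's flat fold over (count, base, candidate) state by a sorted-array greedy that
-- jumps with a hand-written binary search (find transmitter house, then skip covered houses) —
-- alternative algorithm, same overall cost (the sort dominates).
-- A raises IndexError on empty houses (houses[0]); Pre_ excludes the empty list (B returns 0
-- there), and also negative transmit_range (outside the problem's natural domain, k >= 1 on
-- HackerRank; there A returns the number of distinct houses while B's binary-search jump makes
-- no progress).


-- ===== PORT A =====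
-- A's loop body over state (count, base_house, candidate_house)
def pvStepA (r : Int) (st : Int × Int × Int) (house : Int) : Int × Int × Int :=
  if house ≤ st.2.1 + r then (st.1, st.2.1, house)
  else if house > st.2.2 + r then (st.1 + 1, house, house)
  else st

def min_transmitters (num_houses : Int) (transmit_range : Int) (houses : List Int) : Int :=
  let hs := PySem.List.sorted (PySem.Set.ofList houses) (fun x => x) false
  match hs with
  | [] => 0  -- houses[0] raises IndexError in Python: excluded by Pre_
  | h :: rest => (rest.foldl (pvStepA transmit_range) (1, h, h)).1

-- ===== PORT B =====
-- Source B's hand-written bisect_right: binary search over indices lo..hi of the fixed sorted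
-- list hs. hs[mid] is in range in every call B makes (0 ≤ lo ≤ mid < hi ≤ n), so getD is
-- exact there; mid = (lo+hi)//2 on nonnegative ints is Nat division.
def pvBisectGo (hs : List Int) (x : Int) : Nat → Nat → Nat → Nat
  | 0, lo, _ => lo
  | fuel + 1, lo, hi =>
    if lo < hi then
      if hs.getD ((lo + hi) / 2) 0 ≤ x then pvBisectGo hs x fuel ((lo + hi) / 2 + 1) hi
      else pvBisectGo hs x fuel lo ((lo + hi) / 2)
    else lo

-- the while loop's state shrinks hi - lo every round, so hi - lo rounds always suffice
def pvBisect (hs : List Int) (x : Int) (lo hi : Nat) : Nat :=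
  pvBisectGo hs x (hi - lo) lo hi

-- Source B's outer while loop, ported with fuel hs.length: inside Pre_ (0 ≤ r) every iteration
-- advances i by at least one (proved in pv_alt_eq_greedy below), so the fuel is never exhausted.
def pvAltLoop (hs : List Int) (r : Int) (n : Nat) : Nat → Nat → Int
  | 0, _ => 0
  | fuel + 1, i =>
    if i < n then
      let j := pvBisect hs (hs.getD i 0 + r) 0 n
      let center := hs.getD (j - 1) 0
      1 + pvAltLoop hs r n fuel (pvBisect hs (center + r) 0 n)
    else 0

def min_transmitters_alt (num_houses : Int) (transmit_range : Int) (houses : List Int) : Int :=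
  let hs := PySem.List.sorted (PySem.Set.ofList houses) (fun x => x) false
  pvAltLoop hs transmit_range hs.length hs.length 0

-- ===== PRECONDITION & SPEC =====
-- A indexes houses[0] of the deduplicated list: empty houses raises IndexError. Negative
-- transmit_range lies outside the problem's natural domain (k ≥ 1); A returns the number of
-- distinct houses there while B diverges, so Pre_ requires 0 ≤ transmit_range as well.
def Pre_min_transmitters (num_houses : Int) (transmit_range : Int) (houses : List Int) : Prop :=
  houses ≠ [] ∧ 0 ≤ transmit_range
instance (num_houses : Int) (transmit_range : Int) (houses : List Int) : Decidable (Pre_min_transmitters num_houses transmit_range houses) := by unfold Pre_min_transmitters; infer_instance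

def pvWitness_min_transmitters : Int × Int × List Int := (4, 1, [7, 2, 4, 9])

def Spec_min_transmitters (num_houses : Int) (transmit_range : Int) (houses : List Int) (out : Int) : Prop := out = min_transmitters_alt num_houses transmit_range houses
instance (num_houses : Int) (transmit_range : Int) (houses : List Int) (out : Int) : Decidable (Spec_min_transmitters num_houses transmit_range houses out) := by unfold Spec_min_transmitters; infer_instance

-- ===== CLAIM (what is proved, stated in full; the proofs are below) =====
def Claim_equal_min_transmitters : Prop := ∀ (num_houses : Int) (transmit_range : Int) (houses : List Int), Dom_min_transmitters num_houses transmit_range houses → Pre_min_transmitters num_houses transmit_range houses → Spec_min_transmitters num_houses transmit_range houses (min_transmitters num_houses transmit_range houses)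

-- ===== LEMMAS AND PROOFS =====

-- A mathematical reference greedy over the sorted distinct houses, used only in the proofs:
-- take the houses within loc + r (phase 1, tracking the last one as the transmitter center),
-- then drop the houses the center covers (phase 2), and recurse.
def pvPhase1 (r loc center : Int) : List Int → Int × List Int
  | [] => (center, [])
  | h :: t => if h ≤ loc + r then pvPhase1 r loc h t else (center, h :: t)

def pvPhase2 (r center : Int) : List Int → List Int
  | [] => []
  | h :: t => if h ≤ center + r then pvPhase2 r center t else h :: t

theorem pvPhase1_len (r loc center : Int) (l : List Int) :
    (pvPhase1 r loc center l).2.length ≤ l.length := by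
  induction l generalizing center with
  | nil => simp [pvPhase1]
  | cons h t ih =>
    simp only [pvPhase1]
    split
    · exact le_trans (ih h) (Nat.le_succ _)
    · simp

theorem pvPhase2_len (r center : Int) (l : List Int) :
    (pvPhase2 r center l).length ≤ l.length := by
  induction l with
  | nil => simp [pvPhase2]
  | cons h t ih =>
    simp only [pvPhase2]
    split
    · exact le_trans ih (Nat.le_succ _)
    · simp

def pvGreedy (r : Int) : List Int → Int
  | [] => 0
  | loc :: rest =>
    let p := pvPhase1 r loc loc rest
    1 + pvGreedy r (pvPhase2 r p.1 p.2)
termination_by l => l.length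
decreasing_by
  exact Nat.lt_succ_of_le (le_trans (pvPhase2_len _ _ _) (pvPhase1_len _ _ _ _))

-- ---- A's fold equals the reference greedy (as in: fold counts n - 1 + greedy) ----

theorem pv_fold_phase1 (r n loc : Int) (l : List Int) (c : Int) :
    l.foldl (pvStepA r) (n, loc, c)
      = (pvPhase1 r loc c l).2.foldl (pvStepA r) (n, loc, (pvPhase1 r loc c l).1) := by
  induction l generalizing c with
  | nil => simp [pvPhase1]
  | cons h t ih =>
    simp only [pvPhase1, List.foldl_cons]
    by_cases hc : h ≤ loc + r
    · simp only [pvStepA, if_pos hc]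
      exact ih h
    · simp only [if_neg hc, List.foldl_cons]

theorem pv_fold_phase2 (r n loc c : Int) (l : List Int)
    (hgt : ∀ x ∈ l, loc + r < x) :
    l.foldl (pvStepA r) (n, loc, c)
      = (pvPhase2 r c l).foldl (pvStepA r) (n, loc, c) := by
  induction l with
  | nil => simp [pvPhase2]
  | cons h t ih =>
    simp only [pvPhase2, List.foldl_cons]
    by_cases hc : h ≤ c + r
    · have h1 : ¬ h ≤ loc + r := by
        have := hgt h (by simp); omega
      have h2 : ¬ h > c + r := by omega
      simp only [if_pos hc, pvStepA, if_neg h1, if_neg h2]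
      exact ih (fun x hx => hgt x (by simp [hx]))
    · simp only [if_neg hc, List.foldl_cons]

theorem pvPhase1_suffix (r loc c : Int) (l : List Int) :
    (pvPhase1 r loc c l).2.IsSuffix l := by
  induction l generalizing c with
  | nil => simp [pvPhase1]
  | cons h t ih =>
    simp only [pvPhase1]
    by_cases hc : h ≤ loc + r
    · simp only [if_pos hc]
      exact (ih h).trans (List.suffix_cons h t)
    · simp [if_neg hc]

theorem pvPhase2_suffix (r c : Int) (l : List Int) :
    (pvPhase2 r c l).IsSuffix l := by
  induction l with
  | nil => simp [pvPhase2]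
  | cons h t ih =>
    simp only [pvPhase2]
    by_cases hc : h ≤ c + r
    · simp only [if_pos hc]
      exact ih.trans (List.suffix_cons h t)
    · simp [if_neg hc]

theorem pvPhase1_head (r loc c : Int) (l : List Int) (h : Int) (t : List Int)
    (he : (pvPhase1 r loc c l).2 = h :: t) : loc + r < h := by
  induction l generalizing c with
  | nil => simp [pvPhase1] at he
  | cons a u ih =>
    simp only [pvPhase1] at he
    by_cases hc : a ≤ loc + r
    · rw [if_pos hc] at he
      exact ih a he
    · rw [if_neg hc] at he
      have he' : a :: u = h :: t := he
      cases he'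
      omega

theorem pvPhase2_head (r c : Int) (l : List Int) (h : Int) (t : List Int)
    (he : pvPhase2 r c l = h :: t) : c + r < h := by
  induction l with
  | nil => simp [pvPhase2] at he
  | cons a u ih =>
    simp only [pvPhase2] at he
    by_cases hc : a ≤ c + r
    · rw [if_pos hc] at he
      exact ih he
    · rw [if_neg hc] at he
      cases he
      omega

theorem pv_main (r : Int) (l : List Int) (n loc : Int)
    (hs : (loc :: l).Pairwise (· < ·)) :
    (l.foldl (pvStepA r) (n, loc, loc)).1 = n - 1 + pvGreedy r (loc :: l) := by
  rw [pv_fold_phase1 r n loc l loc]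
  set c := (pvPhase1 r loc loc l).1 with hc
  set l1 := (pvPhase1 r loc loc l).2 with hl1
  have hs1 : l1.Pairwise (· < ·) :=
    List.Pairwise.sublist (pvPhase1_suffix r loc loc l).sublist hs.of_cons
  have hgt : ∀ x ∈ l1, loc + r < x := by
    intro x hx
    cases hl : l1 with
    | nil => rw [hl] at hx; simp at hx
    | cons h t =>
      have hh := pvPhase1_head r loc loc l h t (hl1.symm.trans hl)
      rw [hl] at hx hs1
      rcases List.mem_cons.mp hx with rfl | hxt
      · exact hh
      · have := (List.pairwise_cons.mp hs1).1 x hxt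
        omega
  rw [pv_fold_phase2 r n loc c l1 hgt]
  set l2 := pvPhase2 r c l1 with hl2
  have hs2 : l2.Pairwise (· < ·) :=
    List.Pairwise.sublist (pvPhase2_suffix r c l1).sublist hs1
  have hAlt : pvGreedy r (loc :: l) = 1 + pvGreedy r l2 := by
    rw [pvGreedy]
  match he2 : l2 with
  | [] =>
    simp only [List.foldl_nil, hAlt, pvGreedy]
    omega
  | h :: t =>
    have hh2 : c + r < h := pvPhase2_head r c l1 h t hl2.symm
    have hh1 : loc + r < h :=
      hgt h ((pvPhase2_suffix r c l1).sublist.subset (hl2 ▸ (by simp : h ∈ h :: t)))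
    have hstep : pvStepA r (n, loc, c) h = (n + 1, h, h) := by
      simp only [pvStepA]
      rw [if_neg (by omega), if_pos (by omega)]
    have hlt : t.length < l.length := by
      have h1 : (h :: t).length ≤ l1.length := by
        rw [hl2]; exact (pvPhase2_suffix r c l1).sublist.length_le
      have h2 : l1.length ≤ l.length := (pvPhase1_suffix r loc loc l).sublist.length_le
      simp at h1; omega
    have hIH := pv_main r t (n + 1) h hs2
    simp only [List.foldl_cons, hstep, hIH, hAlt]
    omega
termination_by l.length
decreasing_by exact hlt

-- ---- B's binary-search loop equals the reference greedy ----

-- phase 1 / phase 2 as takeWhile/dropWhile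
theorem pvPhase2_eq_dropWhile (r c : Int) (l : List Int) :
    pvPhase2 r c l = l.dropWhile (fun h => decide (h ≤ c + r)) := by
  induction l with
  | nil => rfl
  | cons h t ih =>
    simp only [pvPhase2, List.dropWhile_cons]
    by_cases hc : h ≤ c + r <;> simp [hc, ih]

theorem pvPhase1_snd_eq (r loc c : Int) (l : List Int) :
    (pvPhase1 r loc c l).2 = l.dropWhile (fun h => decide (h ≤ loc + r)) := by
  induction l generalizing c with
  | nil => rfl
  | cons h t ih =>
    simp only [pvPhase1, List.dropWhile_cons]
    by_cases hc : h ≤ loc + r <;> simp [hc, ih]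

theorem pvPhase1_fst_eq (r loc c : Int) (l : List Int) :
    (pvPhase1 r loc c l).1 = (l.takeWhile (fun h => decide (h ≤ loc + r))).getLastD c := by
  induction l generalizing c with
  | nil => rfl
  | cons h t ih =>
    simp only [pvPhase1, List.takeWhile_cons]
    by_cases hc : h ≤ loc + r
    · rw [if_pos hc, ih h, if_pos (by simpa using hc), List.getLastD_cons]
    · rw [if_neg hc, if_neg (by simpa using hc)]
      rfl

-- on a strictly sorted list, elements ≤ x are exactly the first countP of them
theorem pv_sorted_le_iff (x : Int) (hs : List Int) (hp : hs.Pairwise (· < ·))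
    (idx : Nat) (hidx : idx < hs.length) :
    (hs.getD idx 0 ≤ x ↔ idx < hs.countP (fun y => decide (y ≤ x))) := by
  induction hs generalizing idx with
  | nil => simp at hidx
  | cons a t ih =>
    rw [List.countP_cons]
    by_cases ha : a ≤ x
    · simp only [ha, decide_true, if_pos]
      cases idx with
      | zero => simp [ha]
      | succ k =>
        rw [List.getD_cons_succ, ih hp.of_cons k (by simpa using hidx)]
        omega
    · have hall : ∀ y ∈ t, ¬ y ≤ x := by
        intro y hy hle
        have := (List.pairwise_cons.mp hp).1 y hy
        omega
      have hc : t.countP (fun y => decide (y ≤ x)) = 0 :=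
        List.countP_eq_zero.mpr (fun y hy => by simpa using hall y hy)
      have hno : ¬ (a :: t).getD idx 0 ≤ x := by
        cases idx with
        | zero => simpa using ha
        | succ k =>
          rw [List.getD_cons_succ, List.getD_eq_getElem _ _ (by simpa using hidx)]
          exact hall _ (List.getElem_mem _)
      have hrhs : ¬ idx < t.countP (fun y => decide (y ≤ x))
          + if decide (a ≤ x) = true then 1 else 0 := by simp [ha, hc]
      exact iff_of_false hno hrhs

theorem pv_sorted_countP_takeWhile (x : Int) (hs : List Int) (hp : hs.Pairwise (· < ·)) :
    hs.countP (fun y => decide (y ≤ x)) = (hs.takeWhile (fun y => decide (y ≤ x))).length := by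
  induction hs with
  | nil => rfl
  | cons a t ih =>
    rw [List.countP_cons, List.takeWhile_cons]
    by_cases ha : a ≤ x
    · simp [ha, ih hp.of_cons]
    · have hc : t.countP (fun y => decide (y ≤ x)) = 0 :=
        List.countP_eq_zero.mpr (by
          intro y hy
          have := (List.pairwise_cons.mp hp).1 y hy
          simp; omega)
      simp [ha, hc]

theorem pvBisectGo_eq (hs : List Int) (x : Int) (c : Nat)
    (hiff : ∀ idx, idx < hs.length → (hs.getD idx 0 ≤ x ↔ idx < c)) :
    ∀ k lo hi, hi - lo ≤ k → lo ≤ c → c ≤ hi → hi ≤ hs.length →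
      pvBisectGo hs x k lo hi = c := by
  intro k
  induction k with
  | zero =>
    intro lo hi h1 h2 h3 h4
    simp only [pvBisectGo]
    omega
  | succ k ih =>
    intro lo hi h1 h2 h3 h4
    simp only [pvBisectGo]
    by_cases hlt : lo < hi
    · rw [if_pos hlt]
      by_cases hle : hs.getD ((lo + hi) / 2) 0 ≤ x
      · rw [if_pos hle]
        have hc := (hiff _ (by omega)).mp hle
        exact ih _ _ (by omega) (by omega) h3 h4
      · rw [if_neg hle]
        have hc : ¬ ((lo + hi) / 2) < c := fun hh => hle ((hiff _ (by omega)).mpr hh)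
        exact ih _ _ (by omega) h2 (by omega) (by omega)
    · rw [if_neg hlt]
      omega

theorem pvBisect_eq (hs : List Int) (x : Int) (c : Nat)
    (hiff : ∀ idx, idx < hs.length → (hs.getD idx 0 ≤ x ↔ idx < c))
    (lo hi : Nat) (hlo : lo ≤ c) (hhi : c ≤ hi) (hn : hi ≤ hs.length) :
    pvBisect hs x lo hi = c :=
  pvBisectGo_eq hs x c hiff (hi - lo) lo hi le_rfl hlo hhi hn

-- helper: composing dropWhile with a weaker predicate
theorem pv_dropWhile_dropWhile (p q : Int → Bool) (himp : ∀ y, p y = true → q y = true)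
    (l : List Int) : (l.dropWhile p).dropWhile q = l.dropWhile q := by
  induction l with
  | nil => rfl
  | cons h t ih =>
    rw [List.dropWhile_cons, List.dropWhile_cons]
    by_cases hph : p h = true
    · rw [if_pos hph, if_pos (himp h hph), ih]
    · rw [if_neg hph]
      rw [List.dropWhile_cons]

-- helper: monotonicity of a strictly sorted list
theorem pv_sorted_getD_le (hs : List Int) (hp : hs.Pairwise (· < ·)) {a b : Nat}
    (hab : a ≤ b) (hb : b < hs.length) : hs.getD a 0 ≤ hs.getD b 0 := by
  rcases Nat.eq_or_lt_of_le hab with rfl | hlt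
  · exact le_refl _
  · rw [List.getD_eq_getElem _ _ (by omega), List.getD_eq_getElem _ _ hb]
    exact (List.pairwise_iff_getElem.mp hp a b (by omega) hb hlt).le

-- helper: every element of the first i+1 houses is at most house i
theorem pv_take_le (hs : List Int) (hp : hs.Pairwise (· < ·)) (i : Nat)
    (hib : i < hs.length) : ∀ y ∈ hs.take (i + 1), y ≤ hs.getD i 0 := by
  intro y hy
  obtain ⟨k, hk, hgy⟩ := List.mem_iff_getElem.mp hy
  have hk' : k < i + 1 := lt_of_lt_of_le hk (by simp)
  have : (hs.take (i + 1))[k] = hs[k] := List.getElem_take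
  rw [this] at hgy
  have := pv_sorted_getD_le hs hp (Nat.le_of_lt_succ hk') hib
  rw [List.getD_eq_getElem _ _ (by omega : k < hs.length)] at this
  omega

-- helper: a bisect to x over the whole sorted list returns countP (≤ x)
theorem pv_bisect_countP (hs : List Int) (hp : hs.Pairwise (· < ·)) (x : Int) :
    pvBisect hs x 0 hs.length = hs.countP (fun y => decide (y ≤ x)) :=
  pvBisect_eq hs x _ (fun idx hidx => pv_sorted_le_iff x hs hp idx hidx)
    0 hs.length (Nat.zero_le _) List.countP_le_length le_rfl

-- helper: dropping the takeWhile prefix is dropWhile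
theorem pv_drop_takeWhile_length (l : List Int) (p : Int → Bool) :
    l.drop (l.takeWhile p).length = l.dropWhile p := by
  induction l with
  | nil => rfl
  | cons a t ih =>
    rw [List.takeWhile_cons, List.dropWhile_cons]
    by_cases hp : p a = true
    · simp [hp, ih]
    · simp [hp]

theorem pv_alt_eq_greedy (hs : List Int) (r : Int) (hr : 0 ≤ r)
    (hp : hs.Pairwise (· < ·)) (fuel i : Nat) (hi : i ≤ hs.length)
    (hf : hs.length - i ≤ fuel) :
    pvAltLoop hs r hs.length fuel i = pvGreedy r (hs.drop i) := by
  induction fuel generalizing i with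
  | zero =>
    have : i = hs.length := by omega
    subst this
    simp only [pvAltLoop, List.drop_length]
    rw [pvGreedy]
  | succ fuel ih =>
    by_cases hib : i < hs.length
    · -- names for the pieces
      set loc := hs.getD i 0 with hloc
      set rest := hs.drop (i + 1) with hrest
      set p1 : Int → Bool := fun y => decide (y ≤ loc + r) with hp1
      set tw := rest.takeWhile p1 with htw
      have hrest_pw : rest.Pairwise (· < ·) := hp.sublist (List.drop_sublist _ _)
      have hdropi : hs.drop i = loc :: rest := by
        rw [hloc, hrest, List.getD_eq_getElem _ _ hib]
        exact List.drop_eq_getElem_cons hib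
      have hrest_gt : ∀ y ∈ rest, loc < y := by
        have := hp.sublist (List.drop_sublist i hs)
        rw [hdropi] at this
        exact (List.pairwise_cons.mp this).1
      have hrest_len : rest.length = hs.length - (i + 1) := List.length_drop
      -- countP of p1 over hs
      have htake_all : ∀ y ∈ hs.take (i + 1), p1 y = true := by
        intro y hy
        have := pv_take_le hs hp i hib y hy
        simp only [hp1, decide_eq_true_eq]
        omega
      have hcount_take : ∀ (q : Int → Bool), (∀ y ∈ hs.take (i + 1), q y = true) →
          (hs.take (i + 1)).countP q = i + 1 := by
        intro q hq
        rw [List.countP_eq_length.mpr hq, List.length_take]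
        omega
      have hsplit : hs.take (i + 1) ++ hs.drop (i + 1) = hs := List.take_append_drop _ _
      have hcountP_split : ∀ (q : Int → Bool), (∀ y ∈ hs.take (i + 1), q y = true) →
          hs.countP q = (i + 1) + rest.countP q := by
        intro q hq
        conv_lhs => rw [← hsplit]
        rw [List.countP_append, hcount_take q hq, ← hrest]
      have hcj : hs.countP p1 = (i + 1) + tw.length := by
        rw [hcountP_split p1 htake_all, pv_sorted_countP_takeWhile (loc + r) rest hrest_pw]
      have hj : pvBisect hs (loc + r) 0 hs.length = (i + 1) + tw.length := by
        rw [pv_bisect_countP hs hp (loc + r), ← hp1, hcj]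
      -- the transmitter house
      have htw_pref : tw.IsPrefix rest := List.takeWhile_prefix _
      have hcenter : hs.getD ((i + 1) + tw.length - 1) 0 = tw.getLastD loc := by
        by_cases htw0 : tw = []
        · rw [htw0]
          simp only [List.length_nil, Nat.add_zero, Nat.add_sub_cancel, List.getLastD_nil]
          exact hloc.symm
        · have hm : 0 < tw.length := List.length_pos_iff.mpr htw0
          have hmr : tw.length ≤ rest.length := htw_pref.length_le
          have hb1 : tw.length - 1 < rest.length := by omega
          have hb2 : i + 1 + (tw.length - 1) < hs.length := by omega
          have h1 : (i + 1) + tw.length - 1 = i + 1 + (tw.length - 1) := by omega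
          have hgl : tw.getLastD loc = tw[tw.length - 1]'(by omega) := by
            rw [List.getLastD_eq_getLast?, List.getLast?_eq_getElem?,
              List.getElem?_eq_getElem (by omega)]
            rfl
          have hpe : tw[tw.length - 1]'(by omega) = rest[tw.length - 1]'hb1 :=
            htw_pref.getElem (by omega)
          have hre : rest[tw.length - 1]'hb1 = hs[i + 1 + (tw.length - 1)]'hb2 :=
            List.getElem_drop
          rw [h1, List.getD_eq_getElem _ _ hb2, hgl, hpe, hre]
      set center := tw.getLastD loc with hcdef
      have hlc : loc ≤ center := by
        by_cases htw0 : tw = []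
        · rw [hcdef, htw0, List.getLastD_nil]
        · have hm : 0 < tw.length := List.length_pos_iff.mpr htw0
          have hgl : center = tw[tw.length - 1]'(by omega) := by
            rw [hcdef, List.getLastD_eq_getLast?, List.getLast?_eq_getElem?,
              List.getElem?_eq_getElem (by omega)]
            rfl
          have hmem : center ∈ tw := by
            rw [hgl]
            exact List.getElem_mem _
          exact (hrest_gt center (htw_pref.subset hmem)).le
      set p2 : Int → Bool := fun y => decide (y ≤ center + r) with hp2def
      have himp : ∀ y, p1 y = true → p2 y = true := by
        intro y hy
        simp only [hp1, decide_eq_true_eq] at hy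
        simp only [hp2def, decide_eq_true_eq]
        omega
      have htake_all2 : ∀ y ∈ hs.take (i + 1), p2 y = true := by
        intro y hy
        exact himp y (htake_all y hy)
      have hcnt2 : hs.countP p2 = (i + 1) + rest.countP p2 := hcountP_split p2 htake_all2
      have hi' : pvBisect hs (center + r) 0 hs.length = (i + 1) + rest.countP p2 := by
        rw [pv_bisect_countP hs hp (center + r), ← hp2def, hcnt2]
      have hcnt2' : rest.countP p2 = (rest.takeWhile p2).length :=
        pv_sorted_countP_takeWhile (center + r) rest hrest_pw
      have hdrop' : hs.drop ((i + 1) + rest.countP p2) = rest.dropWhile p2 := by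
        rw [← List.drop_drop, ← hrest, hcnt2', pv_drop_takeWhile_length]
      -- progress and fuel
      have hprog : i + 1 ≤ (i + 1) + rest.countP p2 := Nat.le_add_right _ _
      have hle' : (i + 1) + rest.countP p2 ≤ hs.length := by
        rw [← hcnt2]
        exact List.countP_le_length
      -- B side step
      have hstep : pvAltLoop hs r hs.length (fuel + 1) i
          = 1 + pvAltLoop hs r hs.length fuel ((i + 1) + rest.countP p2) := by
        simp only [pvAltLoop, if_pos hib]
        rw [← hloc, hj, hcenter, hi']
      -- greedy side step
      have hgreedy : pvGreedy r (hs.drop i) = 1 + pvGreedy r (rest.dropWhile p2) := by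
        rw [hdropi, pvGreedy]
        have e1 : (pvPhase1 r loc loc rest).1 = center := by
          rw [pvPhase1_fst_eq, ← hp1, ← htw, ← hcdef]
        have e2 : (pvPhase1 r loc loc rest).2 = rest.dropWhile p1 := by
          rw [pvPhase1_snd_eq, ← hp1]
        rw [e1, e2, pvPhase2_eq_dropWhile, ← hp2def, pv_dropWhile_dropWhile p1 p2 himp]
      rw [hstep, hgreedy, ih _ hle' (by omega), hdrop']
    · have : i = hs.length := by omega
      subst this
      simp only [pvAltLoop, if_neg hib, List.drop_length]
      rw [pvGreedy]

-- ===== VERDICT (by name: the statement is the Claim_ definition above) =====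
theorem min_transmitters_spec : Claim_equal_min_transmitters := by
  intro num_houses r houses _ hpre
  unfold Spec_min_transmitters
  have hsp : (PySem.List.sorted (PySem.Set.ofList houses) (fun x => x) false).Pairwise (· < ·) :=
    PySem.List.sorted_ofList_pairwise_lt (xs := houses)
  rcases he : PySem.List.sorted (PySem.Set.ofList houses) (fun x => x) false with _ | ⟨h, rest⟩
  · exfalso
    have := (PySem.List.sorted_eq_nil_iff (xs := PySem.Set.ofList houses)
      (key := fun x => x) (rev := false)).mp he
    rcases houses with _ | ⟨a, t⟩
    · exact hpre.1 rfl
    · have : a ∈ PySem.Set.ofList (a :: t) := by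
        rw [PySem.Set.mem_ofList]; simp
      simp_all
  · rw [he] at hsp
    have halt := pv_alt_eq_greedy (h :: rest) r hpre.2 hsp (h :: rest).length 0
      (Nat.zero_le _) (by omega)
    simp only [min_transmitters, min_transmitters_alt, he]
    rw [pv_main r rest 1 h hsp, halt]
    simp only [List.drop_zero]
    omega
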